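-- pv_equiv track=rewrite | github.com/adnathanail/aoc | 2024/day04/part1.py | get_substr_from_xy_range
-- ===== SOURCE A (Python) =====
-- def get_substr_from_xy_range(puz, ymin, ymax, xmin, xmax):
--     yrange = abs(ymax - ymin)
--     ystep = 1 if ymin < ymax else -1
--     xrange = abs(xmax - xmin)
--     xstep = 1 if xmin < xmax else -1
--     if yrange > 0 and xrange > 0 and yrange != xrange:
--         raise Exception("X and Y ranges must be equal length, or 0")
--     if yrange == 0:
--         coords = [(ymin, x) for x in range(xmin, xmax, xstep)]
--     elif xrange == 0:
--         coords = [(y, xmin) for y in range(ymin, ymax, ystep)]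
--     else:
--         coords = [(y, x) for (y, x) in zip(range(ymin, ymax, ystep), range(xmin, xmax, xstep))]
--
--     return "".join(puz[y][x] for (y, x) in coords if y >= 0 and y < len(puz) and x >= 0 and x < len(puz[y]))
-- ===== SOURCE B (Python) =====
-- def get_substr_from_xy_range(puz, ymin, ymax, xmin, xmax):
--     yr = abs(ymax - ymin)
--     xr = abs(xmax - xmin)
--     if yr > 0 and xr > 0 and yr != xr:
--         raise Exception("X and Y ranges must be equal length, or 0")
--     n = max(yr, xr)
--     H = len(puz)
--     lo, hi = 0, n
--     # clip the step interval by the y edges of the grid: keep only i with 0 <= y(i) < H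
--     if ymin < ymax:
--         lo = max(lo, -ymin)
--         hi = min(hi, H - ymin)
--     elif ymax < ymin:
--         lo = max(lo, ymin - H + 1)
--         hi = min(hi, ymin + 1)
--     elif not (0 <= ymin < H):
--         hi = lo
--     # clip by the left x edge: keep only i with x(i) >= 0 (the right edge is ragged)
--     if xmin < xmax:
--         lo = max(lo, -xmin)
--     elif xmax < xmin:
--         hi = min(hi, xmin + 1)
--     elif xmin < 0:
--         hi = lo
--     dy = (ymin < ymax) - (ymax < ymin)
--     dx = (xmin < xmax) - (xmax < xmin)
--     out = []
--     for i in range(lo, hi):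
--         row = puz[ymin + i * dy]
--         x = xmin + i * dx
--         if x < len(row):
--             out.append(row[x])
--     return "".join(out)
-- ===== Notes on version B (the rewrite author's own statement) =====
-- stated objective: alternative
-- what changed: Instead of A's three-branch coordinate-list construction (range/range/zip) with a four-way per-character bounds test, B clips the line segment to the grid up front by O(1) interval arithmetic on the step index (y bounds and the left x edge), then walks only the clipped interval with a single ragged-row length check and no coordinate list.
import Mathlib
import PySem

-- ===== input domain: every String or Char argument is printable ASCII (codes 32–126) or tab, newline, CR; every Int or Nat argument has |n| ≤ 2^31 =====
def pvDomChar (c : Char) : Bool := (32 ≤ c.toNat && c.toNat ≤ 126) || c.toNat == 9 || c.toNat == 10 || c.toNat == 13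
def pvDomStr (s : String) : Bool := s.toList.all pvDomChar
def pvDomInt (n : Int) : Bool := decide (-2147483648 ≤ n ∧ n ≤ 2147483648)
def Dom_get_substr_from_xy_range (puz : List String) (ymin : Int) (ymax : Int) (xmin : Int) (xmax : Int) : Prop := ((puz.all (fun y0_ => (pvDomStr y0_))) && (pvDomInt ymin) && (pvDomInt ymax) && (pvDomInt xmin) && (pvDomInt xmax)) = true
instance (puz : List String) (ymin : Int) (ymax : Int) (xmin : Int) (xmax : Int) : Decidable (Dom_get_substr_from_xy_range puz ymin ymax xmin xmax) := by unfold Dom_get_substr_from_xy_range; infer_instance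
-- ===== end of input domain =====

-- B clips the line segment to the grid by interval arithmetic on the step index up front,
-- then walks only the clipped interval with a single ragged-row length check,
-- instead of A's three-branch coordinate-list construction with a four-way per-char test.

-- ===== PORT A =====
def get_substr_from_xy_range (puz : List String) (ymin : Int) (ymax : Int) (xmin : Int) (xmax : Int) : String :=
  let yrange : Int := |ymax - ymin|
  let ystep : Int := if ymin < ymax then 1 else -1
  let xrange : Int := |xmax - xmin|
  let xstep : Int := if xmin < xmax then 1 else -1
  -- the 'raise' branch is excluded by Pre_get_substr_from_xy_range
  let coords : List (Int × Int) :=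
    if yrange = 0 then (PySem.List.pyRange xmin xmax xstep).map (fun x => (ymin, x))
    else if xrange = 0 then (PySem.List.pyRange ymin ymax ystep).map (fun y => (y, xmin))
    else (PySem.List.pyRange ymin ymax ystep).zip (PySem.List.pyRange xmin xmax xstep)
  String.mk (coords.foldl (fun acc yx =>
    if 0 ≤ yx.1 ∧ yx.1 < (puz.length : Int) ∧ 0 ≤ yx.2 ∧
        yx.2 < PySem.Str.len (PySem.List.pyGetD puz yx.1 "") then
      acc ++ [(PySem.Str.pyGet? (PySem.List.pyGetD puz yx.1 "") yx.2).getD ' ']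
    else acc) [])

-- ===== PORT B =====
def get_substr_from_xy_range_alt (puz : List String) (ymin : Int) (ymax : Int) (xmin : Int) (xmax : Int) : String :=
  let yr : Int := |ymax - ymin|
  let xr : Int := |xmax - xmin|
  -- the 'raise' branch is excluded by Pre_get_substr_from_xy_range
  let n : Int := max yr xr
  let H : Int := (puz.length : Int)
  let lo0 : Int := 0
  let hi0 : Int := n
  -- clip the step interval by the y edges of the grid: keep only i with 0 <= y(i) < H
  let lo1 : Int := if ymin < ymax then max lo0 (-ymin)
                   else if ymax < ymin then max lo0 (ymin - H + 1) else lo0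
  let hi1 : Int := if ymin < ymax then min hi0 (H - ymin)
                   else if ymax < ymin then min hi0 (ymin + 1)
                   else if 0 ≤ ymin ∧ ymin < H then hi0 else lo0
  -- clip by the left x edge: keep only i with x(i) >= 0 (the right edge is ragged)
  let lo2 : Int := if xmin < xmax then max lo1 (-xmin) else lo1
  let hi2 : Int := if xmin < xmax then hi1
                   else if xmax < xmin then min hi1 (xmin + 1)
                   else if xmin < 0 then lo1 else hi1
  let dy : Int := (if ymin < ymax then 1 else 0) - (if ymax < ymin then 1 else 0)
  let dx : Int := (if xmin < xmax then 1 else 0) - (if xmax < xmin then 1 else 0)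
  String.mk ((PySem.List.pyRange lo2 hi2 1).foldl (fun acc i =>
    if xmin + i * dx < PySem.Str.len (PySem.List.pyGetD puz (ymin + i * dy) "") then
      acc ++ [(PySem.Str.pyGet? (PySem.List.pyGetD puz (ymin + i * dy) "") (xmin + i * dx)).getD ' ']
    else acc) [])

-- ===== PRECONDITION & SPEC =====
-- Pre_ excludes exactly the inputs on which A raises its Exception: both ranges nonzero and unequal.
def Pre_get_substr_from_xy_range (puz : List String) (ymin : Int) (ymax : Int) (xmin : Int) (xmax : Int) : Prop :=
  ymax = ymin ∨ xmax = xmin ∨ |ymax - ymin| = |xmax - xmin|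
instance (puz : List String) (ymin : Int) (ymax : Int) (xmin : Int) (xmax : Int) : Decidable (Pre_get_substr_from_xy_range puz ymin ymax xmin xmax) := by unfold Pre_get_substr_from_xy_range; infer_instance
def pvWitness_get_substr_from_xy_range : List String × Int × Int × Int × Int := (["abc", "def", "ghi"], 0, 3, 0, 3)

def Spec_get_substr_from_xy_range (puz : List String) (ymin : Int) (ymax : Int) (xmin : Int) (xmax : Int) (out : String) : Prop := out = get_substr_from_xy_range_alt puz ymin ymax xmin xmax
instance (puz : List String) (ymin : Int) (ymax : Int) (xmin : Int) (xmax : Int) (out : String) : Decidable (Spec_get_substr_from_xy_range puz ymin ymax xmin xmax out) := by unfold Spec_get_substr_from_xy_range; infer_instance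

-- ===== CLAIM (what is proved, stated in full; the proofs are below) =====
def Claim_equal_get_substr_from_xy_range : Prop := ∀ (puz : List String) (ymin : Int) (ymax : Int) (xmin : Int) (xmax : Int), Dom_get_substr_from_xy_range puz ymin ymax xmin xmax → Pre_get_substr_from_xy_range puz ymin ymax xmin xmax → Spec_get_substr_from_xy_range puz ymin ymax xmin xmax (get_substr_from_xy_range puz ymin ymax xmin xmax)

-- ===== LEMMAS AND PROOFS =====

-- unit direction of the line (same value B computes by boolean subtraction)
def pvDir (a b : Int) : Int := if a < b then 1 else if b < a then -1 else 0

-- A's exclusive range with computed ±1 step, as a map over List.range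
theorem pvRange_step (a b : Int) :
    PySem.List.pyRange a b (if a < b then (1 : Int) else -1)
      = (List.range (b - a).natAbs).map (fun (k : Nat) => a + (k : Int) * pvDir a b) := by
  rcases lt_trichotomy a b with h | h | h
  · rw [if_pos h, PySem.List.pyRange_one]
    have he : (b - a).toNat = (b - a).natAbs := by omega
    rw [he]
    refine List.map_congr_left (fun k _ => ?_)
    simp [pvDir, if_pos h]
  · subst h
    rw [if_neg (lt_irrefl a), PySem.List.pyRange_neg_one_eq_nil le_rfl]
    simp
  · rw [if_neg (not_lt.mpr h.le), PySem.List.pyRange_neg_one]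
    have he : (a - b).toNat = (b - a).natAbs := by omega
    rw [he]
    refine List.map_congr_left (fun k _ => ?_)
    simp only [pvDir, if_neg (not_lt.mpr h.le), if_pos h]
    ring

-- A's coordinate list equals a single map over List.range, under Pre_
theorem pvCoords_eq (ymin ymax xmin xmax : Int)
    (hpre : ymax = ymin ∨ xmax = xmin ∨ |ymax - ymin| = |xmax - xmin|) :
    (if |ymax - ymin| = 0 then
        (PySem.List.pyRange xmin xmax (if xmin < xmax then (1:Int) else -1)).map (fun x => (ymin, x))
      else if |xmax - xmin| = 0 then
        (PySem.List.pyRange ymin ymax (if ymin < ymax then (1:Int) else -1)).map (fun y => (y, xmin))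
      else
        (PySem.List.pyRange ymin ymax (if ymin < ymax then (1:Int) else -1)).zip
          (PySem.List.pyRange xmin xmax (if xmin < xmax then (1:Int) else -1)))
      = (List.range (max |ymax - ymin| |xmax - xmin|).toNat).map
          (fun (i : Nat) => (ymin + (i : Int) * pvDir ymin ymax, xmin + (i : Int) * pvDir xmin xmax)) := by
  have By : |ymax - ymin| = ((ymax - ymin).natAbs : Int) := Int.abs_eq_natAbs _
  have Bx : |xmax - xmin| = ((xmax - xmin).natAbs : Int) := Int.abs_eq_natAbs _
  by_cases hy : |ymax - ymin| = 0
  · rw [if_pos hy, pvRange_step]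
    have hdy : pvDir ymin ymax = 0 := by unfold pvDir; split_ifs <;> omega
    have hn : (max |ymax - ymin| |xmax - xmin|).toNat = (xmax - xmin).natAbs := by omega
    rw [hn, List.map_map]
    refine List.map_congr_left (fun k _ => ?_)
    simp [hdy]
  · rw [if_neg hy]
    by_cases hx : |xmax - xmin| = 0
    · rw [if_pos hx, pvRange_step]
      have hdx : pvDir xmin xmax = 0 := by unfold pvDir; split_ifs <;> omega
      have hn : (max |ymax - ymin| |xmax - xmin|).toNat = (ymax - ymin).natAbs := by omega
      rw [hn, List.map_map]
      refine List.map_congr_left (fun k _ => ?_)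
      simp [hdx]
    · rw [if_neg hx, pvRange_step, pvRange_step]
      have heq : |ymax - ymin| = |xmax - xmin| := by
        rcases hpre with h | h | h
        · exfalso; apply hy; rw [h]; simp
        · exfalso; apply hx; rw [h]; simp
        · exact h
      have he : (xmax - xmin).natAbs = (ymax - ymin).natAbs := by omega
      have hn : (max |ymax - ymin| |xmax - xmin|).toNat = (ymax - ymin).natAbs := by omega
      rw [he, hn, List.zip_map']

-- generic interval-clipping filter identity: filtering a full index range by a predicate P
-- that is equivalent (inside the range) to membership in [lo,hi) plus a residual test Q
theorem pvFilter_clip (n lo hi : Int) (P Q : Int → Prop) [DecidablePred P] [DecidablePred Q]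
    (h0 : 0 ≤ lo) (hhi : lo < hi → hi ≤ n)
    (hkey : ∀ i : Int, 0 ≤ i → i < n → (P i ↔ (lo ≤ i ∧ i < hi ∧ Q i))) :
    (PySem.List.pyRange 0 n 1).filter (fun i => decide (P i))
      = (PySem.List.pyRange lo hi 1).filter (fun i => decide (Q i)) := by
  by_cases hlt : lo < hi
  · have hn : hi ≤ n := hhi hlt
    rw [PySem.List.pyRange_one_append 0 lo n h0 (by omega),
        PySem.List.pyRange_one_append lo hi n hlt.le hn,
        List.filter_append, List.filter_append]
    have e1 : (PySem.List.pyRange 0 lo 1).filter (fun i => decide (P i)) = [] := by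
      refine List.filter_eq_nil_iff.mpr (fun i hm => ?_)
      rw [PySem.List.mem_pyRange_one] at hm
      simp only [decide_eq_true_eq]
      intro hP
      have := (hkey i hm.1 (by omega)).mp hP
      omega
    have e3 : (PySem.List.pyRange hi n 1).filter (fun i => decide (P i)) = [] := by
      refine List.filter_eq_nil_iff.mpr (fun i hm => ?_)
      rw [PySem.List.mem_pyRange_one] at hm
      simp only [decide_eq_true_eq]
      intro hP
      have := (hkey i (by omega) hm.2).mp hP
      omega
    have e2 : (PySem.List.pyRange lo hi 1).filter (fun i => decide (P i))
        = (PySem.List.pyRange lo hi 1).filter (fun i => decide (Q i)) := by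
      refine List.filter_congr (fun i hm => ?_)
      rw [PySem.List.mem_pyRange_one] at hm
      refine decide_eq_decide.mpr ?_
      have hk := hkey i (by omega) (by omega)
      constructor
      · intro hP; exact ((hk.mp hP)).2.2
      · intro hQ; exact hk.mpr ⟨hm.1, hm.2, hQ⟩
    rw [e1, e2, e3]
    simp
  · have hnil : PySem.List.pyRange lo hi 1 = [] := PySem.List.pyRange_one_eq_nil (by omega)
    rw [hnil]
    refine List.filter_eq_nil_iff.mpr (fun i hm => ?_)
    rw [PySem.List.mem_pyRange_one] at hm
    simp only [decide_eq_true_eq]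
    intro hP
    have := (hkey i hm.1 hm.2).mp hP
    omega

-- the clipped interval captures exactly the y-bounds and left-x-bound tests
theorem pvKey (H ymin ymax xmin xmax i : Int) (h0 : 0 ≤ i)
    (hn : i < max |ymax - ymin| |xmax - xmin|) :
    ((0 ≤ ymin + i * pvDir ymin ymax ∧ ymin + i * pvDir ymin ymax < H ∧
        0 ≤ xmin + i * pvDir xmin xmax)
      ↔ ((if xmin < xmax then max (if ymin < ymax then max 0 (-ymin)
              else if ymax < ymin then max 0 (ymin - H + 1) else 0) (-xmin)
            else (if ymin < ymax then max 0 (-ymin)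
              else if ymax < ymin then max 0 (ymin - H + 1) else 0)) ≤ i ∧
          i < (if xmin < xmax then
                (if ymin < ymax then min (max |ymax - ymin| |xmax - xmin|) (H - ymin)
                 else if ymax < ymin then min (max |ymax - ymin| |xmax - xmin|) (ymin + 1)
                 else if 0 ≤ ymin ∧ ymin < H then max |ymax - ymin| |xmax - xmin| else 0)
               else if xmax < xmin then
                min (if ymin < ymax then min (max |ymax - ymin| |xmax - xmin|) (H - ymin)
                 else if ymax < ymin then min (max |ymax - ymin| |xmax - xmin|) (ymin + 1)
                 else if 0 ≤ ymin ∧ ymin < H then max |ymax - ymin| |xmax - xmin| else 0) (xmin + 1)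
               else if xmin < 0 then
                (if ymin < ymax then max 0 (-ymin)
                 else if ymax < ymin then max 0 (ymin - H + 1) else 0)
               else
                (if ymin < ymax then min (max |ymax - ymin| |xmax - xmin|) (H - ymin)
                 else if ymax < ymin then min (max |ymax - ymin| |xmax - xmin|) (ymin + 1)
                 else if 0 ≤ ymin ∧ ymin < H then max |ymax - ymin| |xmax - xmin| else 0)))) := by
  have hy1 := abs_choice (ymax - ymin)
  have hy2 := abs_nonneg (ymax - ymin)
  have hx1 := abs_choice (xmax - xmin)
  have hx2 := abs_nonneg (xmax - xmin)
  simp only [pvDir]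
  split_ifs <;> omega

-- ===== VERDICT (by name: the statement is the Claim_ definition above) =====
-- bridge: a filtered map over List.range n.toNat (Nat indices) as a filtered map over pyRange 0 n (Int indices)
theorem pvNatToInt (n : Int) (P : Int → Prop) [DecidablePred P] (c : Int → Char) :
    List.map (fun k : Nat => c ↑k) (List.filter (fun k : Nat => decide (P ↑k)) (List.range n.toNat))
      = List.map c (List.filter (fun i => decide (P i)) (PySem.List.pyRange 0 n 1)) := by
  rw [PySem.List.pyRange_one]
  simp [List.filter_map, List.map_map, Function.comp_def]

-- ===== VERDICT (by name: the statement is the Claim_ definition above) =====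
theorem get_substr_from_xy_range_spec : Claim_equal_get_substr_from_xy_range := by
  intro puz ymin ymax xmin xmax _ hpre
  unfold Spec_get_substr_from_xy_range get_substr_from_xy_range get_substr_from_xy_range_alt
  simp only []
  rw [pvCoords_eq ymin ymax xmin xmax hpre]
  have hdy : ((if ymin < ymax then (1:Int) else 0) - (if ymax < ymin then 1 else 0)) = pvDir ymin ymax := by
    unfold pvDir; split_ifs <;> omega
  have hdx : ((if xmin < xmax then (1:Int) else 0) - (if xmax < xmin then 1 else 0)) = pvDir xmin xmax := by
    unfold pvDir; split_ifs <;> omega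
  simp only [hdy, hdx, List.foldl_map]
  rw [PySem.List.foldl_append_ite, PySem.List.foldl_append_ite]
  simp only [List.nil_append]
  rw [pvNatToInt (max |ymax - ymin| |xmax - xmin|)
      (fun i => 0 ≤ ymin + i * pvDir ymin ymax ∧ ymin + i * pvDir ymin ymax < (puz.length : Int) ∧
        0 ≤ xmin + i * pvDir xmin xmax ∧
        xmin + i * pvDir xmin xmax < PySem.Str.len (PySem.List.pyGetD puz (ymin + i * pvDir ymin ymax) ""))
      (fun i => (PySem.Str.pyGet? (PySem.List.pyGetD puz (ymin + i * pvDir ymin ymax) "")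
        (xmin + i * pvDir xmin xmax)).getD ' ')]
  refine congrArg String.mk (congrArg _ (pvFilter_clip _ _ _ _ _ ?_ ?_ ?_))
  · -- 0 ≤ lo
    split_ifs <;> omega
  · -- lo < hi → hi ≤ n
    have hy2 := abs_nonneg (ymax - ymin)
    have hx2 := abs_nonneg (xmax - xmin)
    split_ifs <;> omega
  · -- the key index-interval characterisation
    intro i h0 hn
    have hk := pvKey (puz.length : Int) ymin ymax xmin xmax i h0 hn
    tauto
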